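-- pv_equiv track=rewrite | github.com/Kaushalsurana/Leetcode | 3310-remove-methods-from-project/3310-remove-methods-from-project.py | remainingMethods
-- ===== SOURCE A (Python) =====
-- from typing import List
--
-- from collections import defaultdict,deque
--
-- def remainingMethods(n: int, k: int, invocations: List[List[int]]) -> List[int]:
--     a=defaultdict(list)
--     b=defaultdict(list)
--     for i,j in invocations:
--         a[i].append(j)
--         b[j].append(i)
--     def ran(k):
--         q=set()
--         p=deque([k])
--         while p:
--             y=p.popleft()
--             if y not in q:
--                 q.add(y)
--                 for i in a[y]:
--                     if i not in q:
--                         p.append(i)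
--         return q
--     sus=ran(k)
--     for i in sus:
--         for j in b[i]:
--             if j not in sus:
--                 return list(range(n))
--     rem=[i for i in range(n) if i not in sus]
--     return rem
-- ===== SOURCE B (Python) =====
-- from typing import List
--
-- def remainingMethods(n: int, k: int, invocations: List[List[int]]) -> List[int]:
--     # Bellman-Ford-style saturation: no adjacency maps, no queue/stack.
--     # Repeatedly sweep the raw edge list, closing `reach` under edges, until a fixpoint.
--     reach = {k}
--     changed = True
--     while changed:
--         changed = False
--         for i, j in invocations:
--             if i in reach and j not in reach:
--                 reach.add(j)
--                 changed = True
--     for i, j in invocations: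
--         if j in reach and i not in reach:
--             return list(range(n))
--     return [i for i in range(n) if i not in reach]
-- ===== Notes on version B (the rewrite author's own statement) =====
-- stated objective: alternative
-- what changed: B builds no adjacency or reverse-adjacency maps and uses no queue/stack: it computes the reachable set by Bellman-Ford-style fixpoint relaxation, repeatedly sweeping the raw invocations list until no new node is added, then one flat scan of the edge list decides all-or-complement; it trades worst-case asymptotics for zero auxiliary graph structure.
import Mathlib
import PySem

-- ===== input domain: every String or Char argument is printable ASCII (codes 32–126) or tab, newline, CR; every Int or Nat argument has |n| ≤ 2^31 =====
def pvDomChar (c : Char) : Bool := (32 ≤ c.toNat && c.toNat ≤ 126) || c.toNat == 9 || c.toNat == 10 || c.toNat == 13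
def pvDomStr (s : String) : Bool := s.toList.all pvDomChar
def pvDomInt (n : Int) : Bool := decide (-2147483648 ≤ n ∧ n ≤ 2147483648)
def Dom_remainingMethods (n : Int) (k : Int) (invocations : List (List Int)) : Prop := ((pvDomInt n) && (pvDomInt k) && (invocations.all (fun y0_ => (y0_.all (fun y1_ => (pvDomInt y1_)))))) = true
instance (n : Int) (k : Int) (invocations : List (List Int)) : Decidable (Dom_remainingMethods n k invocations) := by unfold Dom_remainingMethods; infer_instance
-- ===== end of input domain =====

-- B replaces A's BFS over adjacency maps by Bellman-Ford-style fixpoint relaxation over the raw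
-- invocations list (no adjacency or reverse maps, no queue), then one flat scan decides
-- all-or-complement (objective: alternative; not claimed faster).

-- ===== PORT A =====
-- a[i].append(j); b[j].append(i) for each row [i, j]  (defaultdict(list) append = Dict.modify, default [])
def pvBuildA (invocations : List (List Int)) :
    PySem.Dict Int (List Int) × PySem.Dict Int (List Int) :=
  invocations.foldl (fun ab r =>
    match r with
    | [i, j] => (ab.1.modify i [] (· ++ [j]), ab.2.modify j [] (· ++ [i]))
    | _ => ab) (PySem.Dict.empty, PySem.Dict.empty)

def pvRanLoop (a : PySem.Dict Int (List Int)) :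
    Nat → PySem.Set Int → List Int → PySem.Set Int
  | _, q, [] => q
  | 0, q, _ :: _ => q
  | f + 1, q, y :: p =>
    if PySem.Set.contains q y then pvRanLoop a f q p
    else
      let q' := PySem.Set.add q y
      pvRanLoop a f q' (p ++ (a.getD y []).filter (fun i => !(PySem.Set.contains q' i)))

def remainingMethods (n : Int) (k : Int) (invocations : List (List Int)) : List Int :=
  let ab := pvBuildA invocations
  let sus := pvRanLoop ab.1 (invocations.length + 1) PySem.Set.empty [k]
  if sus.any (fun i => ((ab.2).getD i []).any (fun j => !(PySem.Set.contains sus j))) then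
    PySem.List.pyRange 0 n 1
  else
    (PySem.List.pyRange 0 n 1).filter (fun i => !(PySem.Set.contains sus i))

-- ===== PORT B =====
-- one 'for i, j in invocations' sweep of the relaxation loop; state = (reach, changed)
def pvPass (invocations : List (List Int)) (s : PySem.Set Int × Bool) :
    PySem.Set Int × Bool :=
  invocations.foldl (fun s r =>
    match r with
    | [i, j] =>
      if PySem.Set.contains s.1 i && !(PySem.Set.contains s.1 j)
      then (PySem.Set.add s.1 j, true) else s
    | _ => s) s

-- 'while changed:' — fuel bounds the number of sweeps (each productive sweep adds a node)
def pvFix (invocations : List (List Int)) : Nat → PySem.Set Int → PySem.Set Int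
  | 0, reach => reach
  | f + 1, reach =>
    let s := pvPass invocations (reach, false)
    if s.2 then pvFix invocations f s.1 else s.1

def remainingMethods_alt (n : Int) (k : Int) (invocations : List (List Int)) : List Int :=
  let reach := pvFix invocations (invocations.length + 1) (PySem.Set.ofList [k])
  if invocations.any (fun r =>
      match r with
      | [i, j] => PySem.Set.contains reach j && !(PySem.Set.contains reach i)
      | _ => false) then
    PySem.List.pyRange 0 n 1
  else
    (PySem.List.pyRange 0 n 1).filter (fun i => !(PySem.Set.contains reach i))

-- ===== PRECONDITION & SPEC =====
-- Pre_ excludes exactly the inputs on which Python A raises: 'for i, j in invocations' unpacks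
-- each row and raises ValueError unless every row has length exactly 2 (B raises there too).
def Pre_remainingMethods (n : Int) (k : Int) (invocations : List (List Int)) : Prop :=
  ∀ r ∈ invocations, r.length = 2
instance (n : Int) (k : Int) (invocations : List (List Int)) : Decidable (Pre_remainingMethods n k invocations) := by unfold Pre_remainingMethods; infer_instance

def pvWitness_remainingMethods : Int × Int × List (List Int) := (4, 1, [[1, 2], [0, 1], [3, 3]])

def Spec_remainingMethods (n : Int) (k : Int) (invocations : List (List Int)) (out : List Int) : Prop := out = remainingMethods_alt n k invocations
instance (n : Int) (k : Int) (invocations : List (List Int)) (out : List Int) : Decidable (Spec_remainingMethods n k invocations out) := by unfold Spec_remainingMethods; infer_instance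

-- ===== CLAIM (what is proved, stated in full; the proofs are below) =====
def Claim_equal_remainingMethods : Prop := ∀ (n : Int) (k : Int) (invocations : List (List Int)), Dom_remainingMethods n k invocations → Pre_remainingMethods n k invocations → Spec_remainingMethods n k invocations (remainingMethods n k invocations)

-- ===== LEMMAS AND PROOFS =====

def pvPairs (invocations : List (List Int)) : List (Int × Int) :=
  invocations.filterMap (fun r => match r with | [i, j] => some (i, j) | _ => none)

def pvR (P : List (Int × Int)) (k x : Int) : Prop :=
  Relation.ReflTransGen (fun u v => (u, v) ∈ P) k x

theorem pvPairs_length_le (invocations : List (List Int)) :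
    (pvPairs invocations).length ≤ invocations.length :=
  List.length_filterMap_le _ _

theorem pvBuildA_aux (y : Int) :
    ∀ (inv : List (List Int)) (ab : PySem.Dict Int (List Int) × PySem.Dict Int (List Int)),
      ((inv.foldl (fun ab r =>
        match r with
        | [i, j] => (ab.1.modify i [] (· ++ [j]), ab.2.modify j [] (· ++ [i]))
        | _ => ab) ab).1.getD y [] =
        ab.1.getD y [] ++ (((pvPairs inv).filter (fun e => e.1 == y)).map (·.2))) ∧
      ((inv.foldl (fun ab r =>
        match r with
        | [i, j] => (ab.1.modify i [] (· ++ [j]), ab.2.modify j [] (· ++ [i]))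
        | _ => ab) ab).2.getD y [] =
        ab.2.getD y [] ++ (((pvPairs inv).filter (fun e => e.2 == y)).map (·.1))) := by
  intro inv
  induction inv with
  | nil => intro ab; simp [pvPairs]
  | cons r t ih =>
    intro ab
    rcases r with _ | ⟨i, _ | ⟨j, _ | ⟨c, rest⟩⟩⟩ <;>
      simp only [List.foldl_cons, pvPairs, List.filterMap_cons] <;>
      try exact ih ab
    constructor
    · rw [(ih _).1, PySem.Dict.getD_modify]
      by_cases hyi : y = i
      · subst hyi; simp [pvPairs, ]
      · simp [hyi, pvPairs, Ne.symm hyi]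
    · rw [(ih _).2, PySem.Dict.getD_modify]
      by_cases hyj : y = j
      · subst hyj; simp [pvPairs, ]
      · simp [hyj, pvPairs, Ne.symm hyj]

theorem pvBuildA_fst_getD (invocations : List (List Int)) (y : Int) :
    ((pvBuildA invocations).1).getD y [] =
      (((pvPairs invocations).filter (fun e => e.1 == y)).map (·.2)) := by
  have h := (pvBuildA_aux y invocations (PySem.Dict.empty, PySem.Dict.empty)).1
  simpa [pvBuildA, PySem.Dict.getD_empty] using h

theorem pvBuildA_snd_getD (invocations : List (List Int)) (y : Int) :
    ((pvBuildA invocations).2).getD y [] =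
      (((pvPairs invocations).filter (fun e => e.2 == y)).map (·.1)) := by
  have h := (pvBuildA_aux y invocations (PySem.Dict.empty, PySem.Dict.empty)).2
  simpa [pvBuildA, PySem.Dict.getD_empty] using h

theorem pvMem_succs (P : List (Int × Int)) (y j : Int) :
    j ∈ ((P.filter (fun e => e.1 == y)).map (·.2)) ↔ (y, j) ∈ P := by
  simp only [List.mem_map, List.mem_filter, beq_iff_eq]
  constructor
  · rintro ⟨⟨u, v⟩, ⟨hm, h1⟩, h2⟩; simp_all
  · intro h; exact ⟨(y, j), ⟨h, rfl⟩, rfl⟩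

theorem pvMem_preds (P : List (Int × Int)) (y j : Int) :
    j ∈ ((P.filter (fun e => e.2 == y)).map (·.1)) ↔ (j, y) ∈ P := by
  simp only [List.mem_map, List.mem_filter, beq_iff_eq]
  constructor
  · rintro ⟨⟨u, v⟩, ⟨hm, h1⟩, h2⟩; simp_all
  · intro h; exact ⟨(j, y), ⟨h, rfl⟩, rfl⟩

theorem pvMem_pairs (inv : List (List Int)) (i j : Int) :
    (i, j) ∈ pvPairs inv ↔ [i, j] ∈ inv := by
  simp only [pvPairs, List.mem_filterMap]
  constructor
  · rintro ⟨r, hr, hm⟩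
    rcases r with _ | ⟨a, _ | ⟨b, _ | ⟨c, t⟩⟩⟩ <;> simp_all
  · intro h; exact ⟨[i, j], h, rfl⟩

theorem pvContains_add (s : PySem.Set Int) (y x : Int) :
    PySem.Set.contains (PySem.Set.add s y) x = (PySem.Set.contains s x || x == y) := by
  rw [Bool.eq_iff_iff]
  simp [PySem.Set.mem_add]

theorem pvClosed_char (P : List (Int × Int)) (k : Int) (q : List Int)
    (hk : k ∈ q) (h1 : ∀ x ∈ q, pvR P k x)
    (hc : ∀ x ∈ q, ∀ j, (x, j) ∈ P → j ∈ q) :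
    ∀ x, x ∈ q ↔ pvR P k x := by
  intro x
  constructor
  · exact h1 x
  · intro hx
    induction hx with
    | refl => exact hk
    | tail hb he ihb => exact hc _ ihb _ he

-- ---- A-side: characterisation of pvRanLoop ----

theorem pvLenSplit (P : List (Int × Int)) (p : Int → Bool) (y : Int) (hy : p y = false) :
    (P.filter (fun e => !p e.1)).length =
      (P.filter (fun e => !p e.1 && !(e.1 == y))).length +
      (P.filter (fun e => e.1 == y)).length := by
  induction P with
  | nil => simp
  | cons e t ih =>
    by_cases hey : e.1 = y
    · simp only [List.filter_cons, hey, hy, beq_self_eq_true]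
      simp [ih]
      omega
    · have h0 : (e.1 == y) = false := by simp [hey]
      simp only [List.filter_cons, h0, Bool.not_false, Bool.and_true]
      cases hp : p e.1 <;> simp [ih] <;> omega

theorem pvCount_split (P : List (Int × Int)) (q : PySem.Set Int) (y : Int) (hy : y ∉ q) :
    (P.filter (fun e => !(PySem.Set.contains q e.1))).length =
      (P.filter (fun e => !(PySem.Set.contains (PySem.Set.add q y) e.1))).length +
      (P.filter (fun e => e.1 == y)).length := by
  have hfun : (fun (e : Int × Int) => !(PySem.Set.contains (PySem.Set.add q y) e.1)) =
      (fun (e : Int × Int) => !(PySem.Set.contains q e.1) && !(e.1 == y)) := by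
    funext e; rw [pvContains_add, Bool.not_or]
  rw [hfun]
  exact pvLenSplit P _ y (by rw [Bool.eq_false_iff]; intro h; exact hy ((PySem.Set.contains_iff q y).mp h))

theorem pvRanLoop_char (a : PySem.Dict Int (List Int)) (P : List (Int × Int)) (k : Int)
    (hg : ∀ y, a.getD y [] = ((P.filter (fun e => e.1 == y)).map (·.2))) :
    ∀ (f : Nat) (q : PySem.Set Int) (p : List Int),
      p.length + (P.filter (fun e => !(PySem.Set.contains q e.1))).length ≤ f →
      (∀ x ∈ q, pvR P k x) → (∀ x ∈ p, pvR P k x) → (k ∈ q ∨ k ∈ p) →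
      (∀ x ∈ q, ∀ j, (x, j) ∈ P → j ∈ q ∨ j ∈ p) →
      ∀ x, x ∈ pvRanLoop a f q p ↔ pvR P k x := by
  intro f
  induction f with
  | zero =>
    intro q p hfuel h1 h2 hk hc x
    cases p with
    | nil =>
      refine pvClosed_char P k q ?_ h1 ?_ x
      · rcases hk with h | h
        · exact h
        · simp at h
      · intro u hu j hj
        rcases hc u hu j hj with h | h
        · exact h
        · simp at h
    | cons y p' => simp only [List.length_cons] at hfuel; omega
  | succ f ih =>
    intro q p hfuel h1 h2 hk hc x
    cases p with
    | nil =>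
      refine pvClosed_char P k q ?_ h1 ?_ x
      · rcases hk with h | h
        · exact h
        · simp at h
      · intro u hu j hj
        rcases hc u hu j hj with h | h
        · exact h
        · simp at h
    | cons y p' =>
      simp only [pvRanLoop]
      by_cases hyq : y ∈ q
      · rw [if_pos ((PySem.Set.contains_iff q y).mpr hyq)]
        refine ih q p' ?_ h1 (fun z hz => h2 z (List.mem_cons_of_mem _ hz)) ?_ ?_ x
        · simp only [List.length_cons] at hfuel; omega
        · rcases hk with h | h
          · exact Or.inl h
          · rcases List.mem_cons.mp h with h | h
            · exact Or.inl (h ▸ hyq)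
            · exact Or.inr h
        · intro u hu j hj
          rcases hc u hu j hj with h | h
          · exact Or.inl h
          · rcases List.mem_cons.mp h with h | h
            · exact Or.inl (h ▸ hyq)
            · exact Or.inr h
      · rw [if_neg (fun h => hyq ((PySem.Set.contains_iff q y).mp h))]
        have hRy : pvR P k y := h2 y List.mem_cons_self
        have hcnt : ((a.getD y []).filter
            (fun i => !(PySem.Set.contains (PySem.Set.add q y) i))).length ≤
            (P.filter (fun e => e.1 == y)).length := by
          calc ((a.getD y []).filter _).length ≤ (a.getD y []).length :=
                List.length_filter_le _ _
            _ = (P.filter (fun e => e.1 == y)).length := by rw [hg y, List.length_map]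
        have hsplit := pvCount_split P q y hyq
        refine ih (PySem.Set.add q y)
          (p' ++ (a.getD y []).filter (fun i => !(PySem.Set.contains (PySem.Set.add q y) i)))
          ?_ ?_ ?_ ?_ ?_ x
        · simp only [List.length_cons] at hfuel
          rw [List.length_append]
          omega
        · intro z hz
          rcases (PySem.Set.mem_add q y z).mp hz with h | h
          · exact h1 z h
          · exact h ▸ hRy
        · intro z hz
          rcases List.mem_append.mp hz with h | h
          · exact h2 z (List.mem_cons_of_mem _ h)
          · have hz2 : z ∈ a.getD y [] := (List.mem_filter.mp h).1
            rw [hg y] at hz2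
            exact Relation.ReflTransGen.tail hRy ((pvMem_succs P y z).mp hz2)
        · rcases hk with h | h
          · exact Or.inl ((PySem.Set.mem_add q y k).mpr (Or.inl h))
          · rcases List.mem_cons.mp h with h | h
            · exact Or.inl ((PySem.Set.mem_add q y k).mpr (Or.inr h))
            · exact Or.inr (List.mem_append.mpr (Or.inl h))
        · intro u hu j hj
          rcases (PySem.Set.mem_add q y u).mp hu with h | h
          · rcases hc u h j hj with h' | h'
            · exact Or.inl ((PySem.Set.mem_add q y j).mpr (Or.inl h'))
            · rcases List.mem_cons.mp h' with h'' | h''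
              · exact Or.inl ((PySem.Set.mem_add q y j).mpr (Or.inr h''))
              · exact Or.inr (List.mem_append.mpr (Or.inl h''))
          · by_cases hjq : j ∈ PySem.Set.add q y
            · exact Or.inl hjq
            · refine Or.inr (List.mem_append.mpr (Or.inr ?_))
              refine List.mem_filter.mpr ⟨?_, ?_⟩
              · rw [hg y]; exact (pvMem_succs P y j).mpr (h ▸ hj)
              · simp only [Bool.not_eq_eq_eq_not, Bool.not_true]
                rw [Bool.eq_false_iff]
                intro hcj
                exact hjq ((PySem.Set.contains_iff _ j).mp hcj)

theorem pvSus_char (k : Int) (inv : List (List Int)) :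
    ∀ x, x ∈ pvRanLoop (pvBuildA inv).1 (inv.length + 1) PySem.Set.empty [k] ↔
      pvR (pvPairs inv) k x := by
  refine pvRanLoop_char (pvBuildA inv).1 (pvPairs inv) k
    (fun y => pvBuildA_fst_getD inv y) (inv.length + 1) PySem.Set.empty [k] ?_ ?_ ?_ ?_ ?_
  · have he : ((pvPairs inv).filter
        (fun e => !(PySem.Set.contains PySem.Set.empty e.1))) = pvPairs inv := by
      apply List.filter_eq_self.mpr
      intro e _
      have : PySem.Set.contains PySem.Set.empty e.1 = false := by
        rw [Bool.eq_false_iff]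
        intro h
        have := (PySem.Set.contains_iff PySem.Set.empty e.1).mp h
        simp [PySem.Set.empty] at this
      rw [this]; rfl
    rw [he]
    have := pvPairs_length_le inv
    simp only [List.length_cons, List.length_nil]
    omega
  · intro x hx; simp [PySem.Set.empty] at hx
  · intro x hx
    rcases List.mem_cons.mp hx with h | h
    · exact h ▸ Relation.ReflTransGen.refl
    · simp at h
  · exact Or.inr List.mem_cons_self
  · intro x hx; simp [PySem.Set.empty] at hx

-- ---- B-side: characterisation of pvFix (fixpoint relaxation) ----

-- one step of the sweep, definitionally
theorem pvPass_cons2 (i j : Int) (t : List (List Int)) (s : PySem.Set Int × Bool) :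
    pvPass ([i, j] :: t) s =
      pvPass t (if PySem.Set.contains s.1 i && !(PySem.Set.contains s.1 j)
                then (PySem.Set.add s.1 j, true) else s) := rfl

theorem pvPairs_cons2 (i j : Int) (t : List (List Int)) :
    pvPairs ([i, j] :: t) = (i, j) :: pvPairs t := rfl

-- monotonicity of one sweep
theorem pvPass_mono : ∀ (l : List (List Int)) (s : PySem.Set Int × Bool) (x : Int),
    x ∈ s.1 → x ∈ (pvPass l s).1 := by
  intro l
  induction l with
  | nil => intro s x hx; exact hx
  | cons r t ih =>
    intro s x hx
    rcases r with _ | ⟨i, _ | ⟨j, _ | ⟨c, rest⟩⟩⟩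
    · exact ih s x hx
    · exact ih s x hx
    · rw [pvPass_cons2]
      split
      · exact ih _ x ((PySem.Set.mem_add s.1 j x).mpr (Or.inl hx))
      · exact ih s x hx
    · exact ih s x hx

-- the flag never goes back to false
theorem pvPass_flag_mono : ∀ (l : List (List Int)) (s : PySem.Set Int × Bool),
    s.2 = true → (pvPass l s).2 = true := by
  intro l
  induction l with
  | nil => intro s h; exact h
  | cons r t ih =>
    intro s h
    rcases r with _ | ⟨i, _ | ⟨j, _ | ⟨c, rest⟩⟩⟩
    · exact ih s h
    · exact ih s h
    · rw [pvPass_cons2]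
      split
      · exact ih _ rfl
      · exact ih s h
    · exact ih s h

-- soundness: every element of the swept set is reachable
theorem pvPass_sound (P : List (Int × Int)) (k : Int) :
    ∀ (l : List (List Int)), (∀ e ∈ pvPairs l, e ∈ P) →
    ∀ (s : PySem.Set Int × Bool), (∀ x ∈ s.1, pvR P k x) →
    ∀ x ∈ (pvPass l s).1, pvR P k x := by
  intro l
  induction l with
  | nil => intro _ s hs x hx; exact hs x hx
  | cons r t ih =>
    intro hP s hs
    rcases r with _ | ⟨i, _ | ⟨j, _ | ⟨c, rest⟩⟩⟩
    · exact ih (fun e he => hP e he) s hs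
    · exact ih (fun e he => hP e he) s hs
    · have hPt : ∀ e ∈ pvPairs t, e ∈ P := by
        intro e he
        exact hP e (pvPairs_cons2 i j t ▸ List.mem_cons_of_mem _ he)
      have hij : (i, j) ∈ P := hP (i, j) (pvPairs_cons2 i j t ▸ List.mem_cons_self)
      rw [pvPass_cons2]
      by_cases hcond : (PySem.Set.contains s.1 i && !(PySem.Set.contains s.1 j)) = true
      · rw [if_pos hcond]
        refine ih hPt _ ?_
        intro x hx
        rcases (PySem.Set.mem_add s.1 j x).mp hx with h | h
        · exact hs x h
        · have hi : i ∈ s.1 :=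
            (PySem.Set.contains_iff s.1 i).mp ((Bool.and_eq_true _ _).mp hcond).1
          exact h ▸ Relation.ReflTransGen.tail (hs i hi) hij
      · rw [if_neg hcond]
        exact ih hPt s hs
    · exact ih (fun e he => hP e he) s hs

-- if the sweep reports no change, it changed nothing and the set is closed under l's edges
theorem pvPass_fixed : ∀ (l : List (List Int)) (s : PySem.Set Int × Bool),
    (pvPass l s).2 = false →
    (pvPass l s).1 = s.1 ∧ (∀ i j, (i, j) ∈ pvPairs l → i ∈ s.1 → j ∈ s.1) := by
  intro l
  induction l with
  | nil =>
    intro s _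
    exact ⟨rfl, by intro i j h; simp [pvPairs] at h⟩
  | cons r t ih =>
    intro s hflag
    rcases r with _ | ⟨i, _ | ⟨j, _ | ⟨c, rest⟩⟩⟩
    · obtain ⟨h1, h2⟩ := ih s hflag
      exact ⟨h1, fun a b hab ha => h2 a b hab ha⟩
    · obtain ⟨h1, h2⟩ := ih s hflag
      exact ⟨h1, fun a b hab ha => h2 a b hab ha⟩
    · rw [pvPass_cons2] at hflag ⊢
      by_cases hcond : (PySem.Set.contains s.1 i && !(PySem.Set.contains s.1 j)) = true
      · rw [if_pos hcond] at hflag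
        have := pvPass_flag_mono t (PySem.Set.add s.1 j, true) rfl
        rw [hflag] at this
        exact absurd this (by simp)
      · rw [if_neg hcond] at hflag ⊢
        obtain ⟨h1, h2⟩ := ih s hflag
        refine ⟨h1, ?_⟩
        intro a b hab ha
        rw [pvPairs_cons2] at hab
        rcases List.mem_cons.mp hab with h | h
        · have hai : a = i := congrArg Prod.fst h
          have hbj : b = j := congrArg Prod.snd h
          subst hai; subst hbj
          by_contra hbs
          apply hcond
          rw [Bool.and_eq_true]
          refine ⟨(PySem.Set.contains_iff s.1 a).mpr ha, ?_⟩
          rw [Bool.not_eq_eq_eq_not, Bool.not_true, Bool.eq_false_iff]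
          intro hc
          exact hbs ((PySem.Set.contains_iff s.1 b).mp hc)
        · exact h2 a b h ha
    · obtain ⟨h1, h2⟩ := ih s hflag
      exact ⟨h1, fun a b hab ha => h2 a b hab ha⟩

-- if the sweep reports a change from a clean flag, some new node entered the set
theorem pvPass_new : ∀ (l : List (List Int)) (s : PySem.Set Int),
    (pvPass l (s, false)).2 = true →
    ∃ j, j ∉ s ∧ j ∈ (pvPass l (s, false)).1 ∧ j ∈ ((pvPairs l).map (·.2)) := by
  intro l
  induction l with
  | nil => intro s h; exact absurd h (by simp [pvPass])
  | cons r t ih =>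
    intro s hflag
    rcases r with _ | ⟨i, _ | ⟨j, _ | ⟨c, rest⟩⟩⟩
    · obtain ⟨j, h1, h2, h3⟩ := ih s hflag
      exact ⟨j, h1, h2, h3⟩
    · obtain ⟨j, h1, h2, h3⟩ := ih s hflag
      exact ⟨j, h1, h2, h3⟩
    · rw [pvPass_cons2] at hflag ⊢
      by_cases hcond : (PySem.Set.contains s i && !(PySem.Set.contains s j)) = true
      · rw [if_pos hcond]
        refine ⟨j, ?_, ?_, ?_⟩
        · intro hj
          have := ((Bool.and_eq_true _ _).mp hcond).2
          rw [Bool.not_eq_eq_eq_not, Bool.not_true, Bool.eq_false_iff] at this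
          exact this ((PySem.Set.contains_iff s j).mpr hj)
        · exact pvPass_mono t (PySem.Set.add s j, true) j
            ((PySem.Set.mem_add s j j).mpr (Or.inr rfl))
        · rw [pvPairs_cons2]
          exact List.mem_map.mpr ⟨(i, j), List.mem_cons_self, rfl⟩
      · rw [if_neg hcond] at hflag ⊢
        obtain ⟨j', h1, h2, h3⟩ := ih s hflag
        refine ⟨j', h1, h2, ?_⟩
        rw [pvPairs_cons2]
        exact List.mem_map.mpr (by
          obtain ⟨e, he, hee⟩ := List.mem_map.mp h3
          exact ⟨e, List.mem_cons_of_mem _ he, hee⟩)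
    · obtain ⟨j', h1, h2, h3⟩ := ih s hflag
      exact ⟨j', h1, h2, h3⟩

-- the count of unreached candidates never grows when the set grows
theorem pvFilterLen_mono (U : List Int) (s t : PySem.Set Int)
    (hsub : ∀ x ∈ U, x ∈ s → x ∈ t) :
    (U.filter (fun x => !(PySem.Set.contains t x))).length ≤
      (U.filter (fun x => !(PySem.Set.contains s x))).length := by
  induction U with
  | nil => simp
  | cons u U' ih =>
    have hsub' : ∀ x ∈ U', x ∈ s → x ∈ t := fun x hx => hsub x (List.mem_cons_of_mem _ hx)
    have hle := ih hsub'
    by_cases hcs : u ∈ s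
    · have hut : u ∈ t := hsub u List.mem_cons_self hcs
      have hb1 : (!PySem.Set.contains s u) = false := by
        rw [(PySem.Set.contains_iff s u).mpr hcs]; rfl
      have hb2 : (!PySem.Set.contains t u) = false := by
        rw [(PySem.Set.contains_iff t u).mpr hut]; rfl
      rw [List.filter_cons, List.filter_cons, hb1, hb2,
          if_neg Bool.false_ne_true, if_neg Bool.false_ne_true]
      exact hle
    · have hb1 : (!PySem.Set.contains s u) = true := by
        have hc : PySem.Set.contains s u = false := by
          rw [Bool.eq_false_iff]; intro h; exact hcs ((PySem.Set.contains_iff s u).mp h)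
        rw [hc]; rfl
      by_cases hct : u ∈ t
      · have hb2 : (!PySem.Set.contains t u) = false := by
          rw [(PySem.Set.contains_iff t u).mpr hct]; rfl
        rw [List.filter_cons, List.filter_cons, hb1, hb2, if_pos rfl,
            if_neg Bool.false_ne_true, List.length_cons]
        exact Nat.le_succ_of_le hle
      · have hb2 : (!PySem.Set.contains t u) = true := by
          have hc : PySem.Set.contains t u = false := by
            rw [Bool.eq_false_iff]; intro h; exact hct ((PySem.Set.contains_iff t u).mp h)
          rw [hc]; rfl
        rw [List.filter_cons, List.filter_cons, hb1, hb2, if_pos rfl, if_pos rfl,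
            List.length_cons, List.length_cons]
        exact Nat.succ_le_succ hle

-- strict decrease of that count across a productive sweep
theorem pvCount_strict (U : List Int) (hnd : U.Nodup) (s t : PySem.Set Int)
    (hsub : ∀ x ∈ U, x ∈ s → x ∈ t) (j : Int) (hjU : j ∈ U) (hjs : j ∉ s) (hjt : j ∈ t) :
    (U.filter (fun x => !(PySem.Set.contains t x))).length <
      (U.filter (fun x => !(PySem.Set.contains s x))).length := by
  induction U with
  | nil => simp at hjU
  | cons u U' ih =>
    rcases List.nodup_cons.mp hnd with ⟨hu, hnd'⟩
    have hsub' : ∀ x ∈ U', x ∈ s → x ∈ t := fun x hx => hsub x (List.mem_cons_of_mem _ hx)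
    by_cases huj : u = j
    · subst huj
      have hb1 : (!PySem.Set.contains s u) = true := by
        have hc : PySem.Set.contains s u = false := by
          rw [Bool.eq_false_iff]; intro h; exact hjs ((PySem.Set.contains_iff s u).mp h)
        rw [hc]; rfl
      have hb2 : (!PySem.Set.contains t u) = false := by
        rw [(PySem.Set.contains_iff t u).mpr hjt]; rfl
      rw [List.filter_cons, List.filter_cons, hb1, hb2, if_pos rfl,
          if_neg Bool.false_ne_true, List.length_cons]
      exact Nat.lt_succ_of_le (pvFilterLen_mono U' s t hsub')
    · have hjU' : j ∈ U' := by
        rcases List.mem_cons.mp hjU with h | h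
        · exact absurd h.symm huj
        · exact h
      have hlt := ih hnd' hsub' hjU'
      by_cases hcs : u ∈ s
      · have hut : u ∈ t := hsub u List.mem_cons_self hcs
        have hb1 : (!PySem.Set.contains s u) = false := by
          rw [(PySem.Set.contains_iff s u).mpr hcs]; rfl
        have hb2 : (!PySem.Set.contains t u) = false := by
          rw [(PySem.Set.contains_iff t u).mpr hut]; rfl
        rw [List.filter_cons, List.filter_cons, hb1, hb2,
            if_neg Bool.false_ne_true, if_neg Bool.false_ne_true]
        exact hlt
      · have hb1 : (!PySem.Set.contains s u) = true := by
          have hc : PySem.Set.contains s u = false := by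
            rw [Bool.eq_false_iff]; intro h; exact hcs ((PySem.Set.contains_iff s u).mp h)
          rw [hc]; rfl
        by_cases hct : u ∈ t
        · have hb2 : (!PySem.Set.contains t u) = false := by
            rw [(PySem.Set.contains_iff t u).mpr hct]; rfl
          rw [List.filter_cons, List.filter_cons, hb1, hb2, if_pos rfl,
              if_neg Bool.false_ne_true, List.length_cons]
          exact Nat.lt_succ_of_lt hlt
        · have hb2 : (!PySem.Set.contains t u) = true := by
            have hc : PySem.Set.contains t u = false := by
              rw [Bool.eq_false_iff]; intro h; exact hct ((PySem.Set.contains_iff t u).mp h)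
            rw [hc]; rfl
          rw [List.filter_cons, List.filter_cons, hb1, hb2, if_pos rfl, if_pos rfl,
              List.length_cons, List.length_cons]
          exact Nat.succ_lt_succ hlt

theorem pvFix_char (inv : List (List Int)) (P : List (Int × Int)) (k : Int)
    (hP : P = pvPairs inv) (U : List Int) (hnd : U.Nodup)
    (hU : ∀ x ∈ (P.map (·.2)), x ∈ U) :
    ∀ (f : Nat) (reach : PySem.Set Int),
      (U.filter (fun x => !(PySem.Set.contains reach x))).length < f →
      (∀ x ∈ reach, pvR P k x) → k ∈ reach →
      ∀ x, x ∈ pvFix inv f reach ↔ pvR P k x := by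
  intro f
  induction f with
  | zero => intro reach hfuel; omega
  | succ f ih =>
    intro reach hfuel hsound hk x
    simp only [pvFix]
    by_cases hflag : (pvPass inv (reach, false)).2 = true
    · rw [if_pos hflag]
      obtain ⟨j, hjs, hjt, hjU0⟩ := pvPass_new inv reach hflag
      have hjU : j ∈ U := hU j (hP ▸ hjU0)
      have hsub : ∀ y ∈ U, y ∈ reach → y ∈ (pvPass inv (reach, false)).1 :=
        fun y _ hy => pvPass_mono inv (reach, false) y hy
      have hlt := pvCount_strict U hnd reach (pvPass inv (reach, false)).1 hsub j hjU hjs hjt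
      refine ih (pvPass inv (reach, false)).1 (by omega) ?_
        (pvPass_mono inv (reach, false) k hk) x
      exact pvPass_sound P k inv (fun e he => hP ▸ he) (reach, false) hsound
    · rw [if_neg hflag]
      rw [Bool.not_eq_true] at hflag
      obtain ⟨heq, hclosed⟩ := pvPass_fixed inv (reach, false) hflag
      rw [heq]
      refine pvClosed_char P k reach hk hsound ?_ x
      intro u hu j hj
      exact hclosed u j (hP ▸ hj) hu

theorem pvReach_char (k : Int) (inv : List (List Int)) :
    ∀ x, x ∈ pvFix inv (inv.length + 1) (PySem.Set.ofList [k]) ↔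
      pvR (pvPairs inv) k x := by
  refine pvFix_char inv (pvPairs inv) k rfl
    (PySem.Set.ofList ((pvPairs inv).map (·.2))) (PySem.Set.nodup_ofList _) ?_
    (inv.length + 1) (PySem.Set.ofList [k]) ?_ ?_ ?_
  · intro x hx
    exact (PySem.Set.mem_ofList _ x).mpr hx
  · have h1 : ((PySem.Set.ofList ((pvPairs inv).map (·.2))).filter
        (fun x => !(PySem.Set.contains (PySem.Set.ofList [k]) x))).length ≤
        (PySem.Set.ofList ((pvPairs inv).map (·.2))).length :=
      List.length_filter_le _ _
    have h2 : (PySem.Set.ofList ((pvPairs inv).map (·.2))).length ≤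
        ((pvPairs inv).map (·.2)).length := PySem.Set.length_ofList_le _
    have h3 := pvPairs_length_le inv
    simp only [List.length_map] at *
    omega
  · intro x hx
    have := (PySem.Set.mem_ofList [k] x).mp hx
    rcases List.mem_cons.mp this with h | h
    · exact h ▸ Relation.ReflTransGen.refl
    · simp at h
  · exact (PySem.Set.mem_ofList [k] k).mpr List.mem_cons_self

theorem pvMain (n k : Int) (inv : List (List Int)) (hpre : ∀ r ∈ inv, r.length = 2) :
    remainingMethods n k inv = remainingMethods_alt n k inv := by
  have hA := pvSus_char k inv
  have hB := pvReach_char k inv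
  set sus := pvRanLoop (pvBuildA inv).1 (inv.length + 1) PySem.Set.empty [k] with hsus
  set reach := pvFix inv (inv.length + 1) (PySem.Set.ofList [k]) with hreach
  have hcontains : ∀ x, PySem.Set.contains sus x = PySem.Set.contains reach x := by
    intro x
    rw [Bool.eq_iff_iff, PySem.Set.contains_iff, PySem.Set.contains_iff, hA, hB]
  have hcond : sus.any (fun i => (((pvBuildA inv).2).getD i []).any
      (fun j => !(PySem.Set.contains sus j))) =
      inv.any (fun r =>
        match r with
        | [i, j] => PySem.Set.contains reach j && !(PySem.Set.contains reach i)
        | _ => false) := by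
    rw [Bool.eq_iff_iff]
    simp only [List.any_eq_true]
    constructor
    · rintro ⟨i, hi, j, hj, hns⟩
      rw [pvBuildA_snd_getD inv i] at hj
      have hedge : (j, i) ∈ pvPairs inv := (pvMem_preds (pvPairs inv) i j).mp hj
      refine ⟨[j, i], (pvMem_pairs inv j i).mp hedge, ?_⟩
      show (PySem.Set.contains reach i && !(PySem.Set.contains reach j)) = true
      rw [Bool.and_eq_true]
      refine ⟨(PySem.Set.contains_iff reach i).mpr ((hB i).mpr ((hA i).mp hi)), ?_⟩
      rw [← hcontains j]
      exact hns
    · rintro ⟨r, hr, hx⟩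
      have hlen := hpre r hr
      rcases r with _ | ⟨i, _ | ⟨j, _ | ⟨c, t⟩⟩⟩
      · simp at hlen
      · simp at hlen
      · replace hx : (PySem.Set.contains reach j && !(PySem.Set.contains reach i)) = true := hx
        rw [Bool.and_eq_true] at hx
        obtain ⟨hcj, hci⟩ := hx
        have hij : (i, j) ∈ pvPairs inv := (pvMem_pairs inv i j).mpr hr
        refine ⟨j, (hA j).mpr ((hB j).mp ((PySem.Set.contains_iff reach j).mp hcj)), i, ?_, ?_⟩
        · rw [pvBuildA_snd_getD inv j]
          exact (pvMem_preds (pvPairs inv) j i).mpr hij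
        · rw [hcontains i]
          exact hci
      · simp at hlen
  simp only [remainingMethods, remainingMethods_alt]
  rw [← hsus, ← hreach, hcond]
  by_cases hc : inv.any (fun r =>
      match r with
      | [i, j] => PySem.Set.contains reach j && !(PySem.Set.contains reach i)
      | _ => false) = true
  · rw [if_pos hc, if_pos hc]
  · rw [if_neg hc, if_neg hc]
    apply List.filter_congr
    intro x _
    rw [hcontains x]

-- ===== VERDICT (by name: the statement is the Claim_ definition above) =====
theorem remainingMethods_spec : Claim_equal_remainingMethods := by
  intro n k invocations _ hpre
  exact pvMain n k invocations hpre
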